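-- pv_equiv track=rewrite | github.com/EugeneSolovey/Home_Work_itHillel | Home_work/HomeWork17.py | get_cities_rec
-- ===== SOURCE A (Python) =====
-- def get_cities_rec(current_list, copy, used):            # recursive function
--     c = current_list[-1]                                 # get last city in current list
--     cur_len = len(used)                                  # get current length of used list
--     iter_next = (nc for nc in copy if nc not in used if nc[0] == c[-1]) # get next cities
--     for item in iter_next:                               # for each next city
--         to_yield = current_list + [item]                 # add to current list
--         used.append(item)                                # add to used list
--         yield to_yield                                   # yield current list
--         yield from get_cities_rec(to_yield, copy, used)  # get all possible combinations
--
--     new_len = len(used)                                  # get new length of used list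
--     if new_len == cur_len:                               # if new length is equal to old length
--         return []                                        # return empty list
-- ===== SOURCE B (Python) =====
-- def get_cities_rec(current_list, copy, used):
--     # Index cities by first letter once, track used cities in a set, and
--     # collect chains into a list instead of yielding from a generator.
--     # Note: A mutates `used` in place; B leaves it untouched (return value only).
--     by_first = {}
--     for city in copy:
--         by_first.setdefault(city[:1], []).append(city)
--     used_set = set(used)
--     out = []
--
--     def dfs(chain):
--         for item in by_first.get(chain[-1][-1:], []):
--             if item not in used_set:
--                 used_set.add(item)
--                 nxt = chain + [item]
--                 out.append(nxt)
--                 dfs(nxt)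
--
--     dfs(current_list)
--     return out
-- ===== Notes on version B (the rewrite author's own statement) =====
-- stated objective: faster
-- what changed: B replaces the generator's per-step full rescan of copy with list membership by a dict bucketing cities by first letter built once plus a set for used-membership, collecting chains into a list.
import Mathlib
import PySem

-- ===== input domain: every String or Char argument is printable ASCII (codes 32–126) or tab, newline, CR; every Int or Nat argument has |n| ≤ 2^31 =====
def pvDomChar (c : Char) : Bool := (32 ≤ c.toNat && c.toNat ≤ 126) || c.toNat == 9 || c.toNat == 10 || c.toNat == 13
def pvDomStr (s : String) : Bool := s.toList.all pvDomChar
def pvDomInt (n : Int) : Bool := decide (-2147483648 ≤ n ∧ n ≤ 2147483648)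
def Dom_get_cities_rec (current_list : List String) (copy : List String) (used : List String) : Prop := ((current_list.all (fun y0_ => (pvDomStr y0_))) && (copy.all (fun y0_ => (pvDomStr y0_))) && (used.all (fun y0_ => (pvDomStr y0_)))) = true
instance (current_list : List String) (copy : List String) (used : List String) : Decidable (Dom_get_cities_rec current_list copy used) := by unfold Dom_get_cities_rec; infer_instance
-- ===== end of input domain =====

-- B indexes copy by first letter in a dict and tracks used cities in a set,
-- removing A's per-candidate full-list scans (B does not mutate `used`; the
-- equivalence proved is about the returned list of chains).


-- ===== PORT A =====
-- A is a recursive generator; the port returns (final used list, yielded chains).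
-- `fuel` only makes the mutual recursion total: each nested generator call permanently
-- consumes one element of copy not yet in used, so fuel = copy.length + 1 is never exhausted.
mutual
def pvA_rec (fuel : Nat) (current_list copy used : List String) :
    List String × List (List String) :=
  match fuel with
  | 0 => (used, [])
  | f + 1 =>
    -- c = current_list[-1]; Pre_ excludes the IndexError (empty current_list)
    let c := (PySem.List.pyGet? current_list (-1)).getD ""
    pvA_scan f c current_list copy copy used
termination_by (fuel, 0)

-- the for-loop over the lazy genexp: rest is the unconsumed part of copy; the
-- membership test `nc not in used` reads `used` as it is when the item is reached.
def pvA_scan (fuel : Nat) (c : String) (current_list copy rest used : List String) :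
    List String × List (List String) :=
  match rest with
  | [] => (used, [])
  | item :: rest' =>
    -- nc not in used if nc[0] == c[-1]; Pre_ excludes the raising cases (empty strings)
    if ¬ used.contains item ∧ PySem.Str.pyGet? item 0 = PySem.Str.pyGet? c (-1) then
      let to_yield := current_list ++ [item]
      let used1 := used ++ [item]
      let r := pvA_rec fuel to_yield copy used1
      let r2 := pvA_scan fuel c current_list copy rest' r.1
      (r2.1, to_yield :: (r.2 ++ r2.2))
    else
      pvA_scan fuel c current_list copy rest' used
termination_by (fuel, rest.length + 1)
end

def get_cities_rec (current_list : List String) (copy : List String) (used : List String) : List (List String) :=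
  (pvA_rec (copy.length + 1) current_list copy used).2

-- ===== PORT B =====
def pvFirstSlice (s : String) : String :=      -- city[:1]
  match s.toList with
  | [] => ""
  | ch :: _ => String.ofList [ch]

def pvLastSlice (s : String) : String :=       -- s[-1:]
  match s.toList.getLast? with
  | none => ""
  | some ch => String.ofList [ch]

-- by_first.setdefault(city[:1], []).append(city)
def pvB_index (copy : List String) : PySem.Dict String (List String) :=
  copy.foldl (fun d city => d.modify (pvFirstSlice city) [] (fun l => l ++ [city])) PySem.Dict.empty

mutual
def pvB_dfs (fuel : Nat) (chain : List String) (idx : PySem.Dict String (List String))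
    (usedSet : PySem.Set String) : PySem.Set String × List (List String) :=
  match fuel with
  | 0 => (usedSet, [])
  | f + 1 =>
    -- by_first.get(chain[-1][-1:], []); Pre_ keeps chains nonempty
    pvB_scan f (idx.getD (pvLastSlice ((chain.getLast?).getD "")) []) chain idx usedSet
termination_by (fuel, 0)

def pvB_scan (fuel : Nat) (items : List String) (chain : List String)
    (idx : PySem.Dict String (List String)) (usedSet : PySem.Set String) :
    PySem.Set String × List (List String) :=
  match items with
  | [] => (usedSet, [])
  | item :: items' =>
    if PySem.Set.contains usedSet item then
      pvB_scan fuel items' chain idx usedSet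
    else
      let nxt := chain ++ [item]
      let r := pvB_dfs fuel nxt idx (PySem.Set.add usedSet item)
      let r2 := pvB_scan fuel items' chain idx r.1
      (r2.1, nxt :: (r.2 ++ r2.2))
termination_by (fuel, items.length + 1)
end

def get_cities_rec_alt (current_list : List String) (copy : List String) (used : List String) : List (List String) :=
  (pvB_dfs (copy.length + 1) current_list (pvB_index copy) (PySem.Set.ofList used)).2

-- ===== PRECONDITION & SPEC =====
-- Pre_ holds exactly where Python A returns: A raises IndexError iff current_list is
-- empty, or copy contains "" not already in used (nc[0] raises when that item is
-- tested), or the last city of current_list is "" while some unused city remains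
-- (c[-1] raises at the first candidate).
def Pre_get_cities_rec (current_list : List String) (copy : List String) (used : List String) : Prop :=
  current_list ≠ [] ∧
  ("" ∈ copy → "" ∈ used) ∧
  ((current_list.getLast?).getD "·" = "" → ∀ s ∈ copy, s ∈ used)
instance (current_list : List String) (copy : List String) (used : List String) : Decidable (Pre_get_cities_rec current_list copy used) := by unfold Pre_get_cities_rec; infer_instance

def pvWitness_get_cities_rec : List String × List String × List String :=
  (["ab"], ["ba", "ab", "aa", "bb"], ["aa"])

def Spec_get_cities_rec (current_list : List String) (copy : List String) (used : List String) (out : List (List String)) : Prop := out = get_cities_rec_alt current_list copy used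
instance (current_list : List String) (copy : List String) (used : List String) (out : List (List String)) : Decidable (Spec_get_cities_rec current_list copy used out) := by unfold Spec_get_cities_rec; infer_instance

-- ===== CLAIM (what is proved, stated in full; the proofs are below) =====
def Claim_equal_get_cities_rec : Prop := ∀ (current_list : List String) (copy : List String) (used : List String), Dom_get_cities_rec current_list copy used → Pre_get_cities_rec current_list copy used → Spec_get_cities_rec current_list copy used (get_cities_rec current_list copy used)

-- ===== LEMMAS AND PROOFS =====

-- the dict built by pvB_index holds, at key k, exactly the cities of copy whose
-- first-letter slice is k, in copy order
theorem pvB_index_getD_aux (copy : List String) (k : String) :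
    ∀ d : PySem.Dict String (List String),
      (copy.foldl (fun d city => d.modify (pvFirstSlice city) [] (fun l => l ++ [city])) d).getD k []
        = d.getD k [] ++ copy.filter (fun s => decide (pvFirstSlice s = k)) := by
  induction copy with
  | nil => intro d; simp
  | cons city copy ih =>
    intro d
    simp only [List.foldl_cons, List.filter_cons]
    rw [ih, PySem.Dict.getD_modify]
    by_cases h : pvFirstSlice city = k
    · simp [h]
    · simp [h, Ne.symm h]

theorem pvB_index_getD (copy : List String) (k : String) :
    (pvB_index copy).getD k [] = copy.filter (fun s => decide (pvFirstSlice s = k)) := by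
  unfold pvB_index
  rw [pvB_index_getD_aux]
  simp [PySem.Dict.getD_empty]

-- A's character test nc[0] == c[-1] agrees with B's slice test
theorem pv_str_pyGet_zero (s : String) : PySem.Str.pyGet? s 0 = s.toList.head? := by
  simp only [PySem.Str.pyGet?, PySem.Chars.pyGet?]
  rw [PySem.List.pyGet?_zero]; cases s.toList <;> simp

theorem pv_str_pyGet_neg_one (s : String) : PySem.Str.pyGet? s (-1) = s.toList.getLast? := by
  simp only [PySem.Str.pyGet?, PySem.Chars.pyGet?]
  rw [PySem.List.pyGet?_neg_one]

theorem pvFirstSlice_eq_head? (s : String) :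
    pvFirstSlice s = (match s.toList.head? with | none => "" | some ch => String.ofList [ch]) := by
  unfold pvFirstSlice
  cases s.toList <;> rfl

theorem pv_ofList_singleton_inj (a b : Char) : a = b ↔ String.ofList [a] = String.ofList [b] := by
  constructor
  · intro h; rw [h]
  · intro h; have := congrArg String.toList h; simpa using this

theorem pv_cond_iff (item c : String) :
    (PySem.Str.pyGet? item 0 = PySem.Str.pyGet? c (-1)) ↔ pvFirstSlice item = pvLastSlice c := by
  rw [pv_str_pyGet_zero, pv_str_pyGet_neg_one, pvFirstSlice_eq_head?]
  unfold pvLastSlice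
  cases hh : item.toList.head? <;> cases hl : c.toList.getLast? <;> simp
  exact pv_ofList_singleton_inj _ _

-- used-set / used-list relation: same membership
def pvRel (s : PySem.Set String) (used : List String) : Prop :=
  ∀ x, PySem.Set.contains s x = used.contains x

theorem pvRel_ofList (used : List String) : pvRel (PySem.Set.ofList used) used := by
  intro x
  simp [PySem.Set.contains_eq_listContains]

theorem pvRel_add (s : PySem.Set String) (used : List String) (item : String)
    (h : pvRel s used) : pvRel (PySem.Set.add s item) (used ++ [item]) := by
  intro x
  have hm := h x
  simp only [PySem.Set.contains_eq_listContains, List.contains_eq_mem, decide_eq_decide] at hm ⊢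
  rw [PySem.Set.mem_add, hm]
  simp [or_comm]

-- the inner for-loop: A scanning the suffix `rest` of copy equals B scanning the
-- corresponding slice of its first-letter bucket
theorem pv_scan_main (f : Nat) (copy : List String)
    (ih : ∀ (cur used : List String) (s : PySem.Set String), pvRel s used →
      (pvA_rec f cur copy used).2 = (pvB_dfs f cur (pvB_index copy) s).2 ∧
      pvRel (pvB_dfs f cur (pvB_index copy) s).1 (pvA_rec f cur copy used).1)
    (cur : List String) (c : String) :
    ∀ (rest used : List String) (s : PySem.Set String), pvRel s used →
      (pvA_scan f c cur copy rest used).2 =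
        (pvB_scan f (rest.filter (fun x => decide (pvFirstSlice x = pvLastSlice c))) cur (pvB_index copy) s).2 ∧
      pvRel (pvB_scan f (rest.filter (fun x => decide (pvFirstSlice x = pvLastSlice c))) cur (pvB_index copy) s).1
        (pvA_scan f c cur copy rest used).1 := by
  intro rest
  induction rest with
  | nil =>
    intro used s hrel
    simp only [List.filter_nil, pvA_scan, pvB_scan]
    exact ⟨trivial, hrel⟩
  | cons item rest' ihr =>
    intro used s hrel
    simp only [List.filter_cons]
    by_cases hc : pvFirstSlice item = pvLastSlice c
    · simp only [hc, decide_true, if_true]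
      by_cases hu : used.contains item = true
      · -- already used: A's first conjunct fails, B skips via the set
        have hA : pvA_scan f c cur copy (item :: rest') used = pvA_scan f c cur copy rest' used := by
          rw [pvA_scan]
          rw [if_neg]
          intro ⟨h1, _⟩; exact h1 hu
        have hB : pvB_scan f (item :: rest'.filter (fun x => decide (pvFirstSlice x = pvLastSlice c))) cur (pvB_index copy) s
            = pvB_scan f (rest'.filter (fun x => decide (pvFirstSlice x = pvLastSlice c))) cur (pvB_index copy) s := by
          rw [pvB_scan, if_pos]
          rw [hrel item]; exact hu
        rw [hA, hB]
        exact ihr used s hrel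
      · -- fresh city: both take the branch
        have hcond : (¬ used.contains item = true ∧ PySem.Str.pyGet? item 0 = PySem.Str.pyGet? c (-1)) := by
          exact ⟨hu, (pv_cond_iff item c).2 hc⟩
        rw [pvA_scan, if_pos hcond, pvB_scan, if_neg (by rw [hrel item]; exact hu)]
        dsimp only
        have hrel1 : pvRel (PySem.Set.add s item) (used ++ [item]) := pvRel_add s used item hrel
        obtain ⟨hout1, hrel2⟩ := ih (cur ++ [item]) (used ++ [item]) (PySem.Set.add s item) hrel1
        obtain ⟨hout2, hrel3⟩ := ihr (pvA_rec f (cur ++ [item]) copy (used ++ [item])).1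
          (pvB_dfs f (cur ++ [item]) (pvB_index copy) (PySem.Set.add s item)).1 hrel2
        constructor
        · rw [hout1, hout2]
        · exact hrel3
    · -- first letters differ: A's second conjunct fails, item absent from B's bucket
      simp only [hc, decide_false]
      have hA : pvA_scan f c cur copy (item :: rest') used = pvA_scan f c cur copy rest' used := by
        rw [pvA_scan, if_neg]
        intro ⟨_, h2⟩; exact hc ((pv_cond_iff item c).1 h2)
      rw [hA]
      exact ihr used s hrel

theorem pv_main (fuel : Nat) (copy : List String) :
    ∀ (cur used : List String) (s : PySem.Set String), pvRel s used →
      (pvA_rec fuel cur copy used).2 = (pvB_dfs fuel cur (pvB_index copy) s).2 ∧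
      pvRel (pvB_dfs fuel cur (pvB_index copy) s).1 (pvA_rec fuel cur copy used).1 := by
  induction fuel with
  | zero => intro cur used s hrel; rw [pvA_rec, pvB_dfs]; exact ⟨rfl, hrel⟩
  | succ f ih =>
    intro cur used s hrel
    rw [pvA_rec, pvB_dfs]
    have hc : (PySem.List.pyGet? cur (-1)).getD "" = (cur.getLast?).getD "" := by
      rw [PySem.List.pyGet?_neg_one]
    rw [pvB_index_getD copy (pvLastSlice ((cur.getLast?).getD ""))]
    rw [← hc]
    exact pv_scan_main f copy ih cur ((PySem.List.pyGet? cur (-1)).getD "") copy used s hrel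

-- ===== VERDICT (by name: the statement is the Claim_ definition above) =====
theorem get_cities_rec_spec : Claim_equal_get_cities_rec := by
  intro cur copy used _ _
  unfold Spec_get_cities_rec get_cities_rec get_cities_rec_alt
  exact (pv_main (copy.length + 1) copy cur used (PySem.Set.ofList used) (pvRel_ofList used)).1
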